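-- pv_equiv track=rewrite | github.com/cheshyre/advent-of-code | 2020/24/hex_grid.py | determine_white_to_black_tile_flip
-- ===== SOURCE A (Python) =====
-- def get_neighbors(point):
--     offsets = [
--         (-1, 0),
--         (1, 0),
--         (-1, -1),
--         (0, -1),
--         (0, 1),
--         (1, 1),
--     ]
--     x, y = point
--     return [(x + xoff, y + yoff) for xoff, yoff in offsets]
--
-- def get_white_tile_neighbors(point, tiles):
--     neighbors = get_neighbors(point)
--     return [x for x in neighbors if x not in tiles]
--
-- def determine_white_to_black_tile_flip(tiles):
--     to_flip = []
--     white_tile_black_neighbor_counts = {}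
--     for x in tiles:
--         white_neighbor_tiles = get_white_tile_neighbors(x, tiles)
--         for y in white_neighbor_tiles:
--             if y in white_tile_black_neighbor_counts:
--                 white_tile_black_neighbor_counts[y] += 1
--             else:
--                 white_tile_black_neighbor_counts[y] = 1
--
--     for y in white_tile_black_neighbor_counts:
--         if white_tile_black_neighbor_counts[y] == 2:
--             to_flip.append(y)
--
--     return to_flip
-- ===== SOURCE B (Python) =====
-- def determine_white_to_black_tile_flip(tiles):
--     offsets = [
--         (-1, 0),
--         (1, 0),
--         (-1, -1),
--         (0, -1),
--         (0, 1),
--         (1, 1),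
--     ]
--     black = set(tiles)
--     # Phase 1: ordered, deduplicated list of candidate white tiles.
--     candidates = dict.fromkeys(
--         (x + dx, y + dy)
--         for x, y in tiles
--         for dx, dy in offsets
--         if (x + dx, y + dy) not in black
--     )
--     # Phase 2: recount each candidate's black neighbors directly.
--     to_flip = []
--     for cx, cy in candidates:
--         nbrs = {(cx + dx, cy + dy) for dx, dy in offsets}
--         if sum(t in nbrs for t in tiles) == 2:
--             to_flip.append((cx, cy))
--     return to_flip
-- ===== Notes on version B (the rewrite author's own statement) =====
-- stated objective: alternative
-- what changed: Replaces A's running black-neighbor tally dict with two explicit phases: first build the ordered deduplicated list of candidate white tiles, then recount each candidate's black neighbors directly against the tile list and keep those with exactly 2.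
import Mathlib
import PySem

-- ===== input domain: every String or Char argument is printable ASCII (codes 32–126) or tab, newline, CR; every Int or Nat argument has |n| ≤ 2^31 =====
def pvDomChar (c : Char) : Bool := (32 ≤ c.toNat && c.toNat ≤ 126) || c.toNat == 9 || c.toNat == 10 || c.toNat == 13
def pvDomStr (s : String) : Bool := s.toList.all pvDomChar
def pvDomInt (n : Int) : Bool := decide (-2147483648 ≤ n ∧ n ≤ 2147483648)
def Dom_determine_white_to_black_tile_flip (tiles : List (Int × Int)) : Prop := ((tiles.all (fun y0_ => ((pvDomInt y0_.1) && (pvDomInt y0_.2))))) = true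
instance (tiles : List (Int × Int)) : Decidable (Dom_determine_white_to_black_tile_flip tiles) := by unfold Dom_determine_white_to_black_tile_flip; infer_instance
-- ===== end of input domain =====

-- B replaces A's running tally dict by two explicit phases: build the ordered deduplicated
-- candidate list, then recount each candidate's black neighbors directly (objective: alternative).

-- ===== PORT A =====
def get_neighbors (point : Int × Int) : List (Int × Int) :=
  let offsets : List (Int × Int) := [(-1, 0), (1, 0), (-1, -1), (0, -1), (0, 1), (1, 1)]
  offsets.map (fun o => (point.1 + o.1, point.2 + o.2))

def get_white_tile_neighbors (point : Int × Int) (tiles : List (Int × Int)) : List (Int × Int) :=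
  (get_neighbors point).filter (fun x => !tiles.contains x)

def determine_white_to_black_tile_flip (tiles : List (Int × Int)) : List (Int × Int) :=
  let counts : PySem.Dict (Int × Int) Int :=
    tiles.foldl (fun d x =>
      (get_white_tile_neighbors x tiles).foldl (fun d y =>
        match d.get? y with
        | some c => d.insert y (c + 1)
        | none   => d.insert y 1) d)
      PySem.Dict.empty
  counts.keys.foldl (fun to_flip y =>
    if counts.getD y 0 == 2 then to_flip ++ [y] else to_flip) []

-- ===== PORT B =====
def determine_white_to_black_tile_flip_alt (tiles : List (Int × Int)) : List (Int × Int) :=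
  let offsets : List (Int × Int) := [(-1, 0), (1, 0), (-1, -1), (0, -1), (0, 1), (1, 1)]
  let black : PySem.Set (Int × Int) := PySem.Set.ofList tiles
  let candidates : List (Int × Int) :=
    PySem.List.dedup (tiles.flatMap (fun t =>
      (offsets.map (fun o => (t.1 + o.1, t.2 + o.2))).filter
        (fun c => !(PySem.Set.contains black c))))
  candidates.foldl (fun to_flip c =>
    let nbrs : PySem.Set (Int × Int) :=
      PySem.Set.ofList (offsets.map (fun o => (c.1 + o.1, c.2 + o.2)))
    if (tiles.map (fun t => if PySem.Set.contains nbrs t then (1 : Int) else 0)).sum == 2 then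
      to_flip ++ [c]
    else to_flip) []

-- ===== PRECONDITION & SPEC =====
def Spec_determine_white_to_black_tile_flip (tiles : List (Int × Int)) (out : List (Int × Int)) : Prop := out = determine_white_to_black_tile_flip_alt tiles
instance (tiles : List (Int × Int)) (out : List (Int × Int)) : Decidable (Spec_determine_white_to_black_tile_flip tiles out) := by unfold Spec_determine_white_to_black_tile_flip; infer_instance

-- ===== CLAIM (what is proved, stated in full; the proofs are below) =====
def Claim_equal_determine_white_to_black_tile_flip : Prop := ∀ (tiles : List (Int × Int)), Dom_determine_white_to_black_tile_flip tiles → Spec_determine_white_to_black_tile_flip tiles (determine_white_to_black_tile_flip tiles)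

-- ===== LEMMAS AND PROOFS =====

-- The flattened list of white neighbors A tallies over.
def pvFlat (tiles : List (Int × Int)) : List (Int × Int) :=
  tiles.flatMap (fun t => get_white_tile_neighbors t tiles)

lemma pv_contains_ofList (xs : List (Int × Int)) (y : Int × Int) :
    PySem.Set.contains (PySem.Set.ofList xs) y = xs.contains y := by
  simp [PySem.Set.contains]

-- A's counter loop is exactly the counter of the flattened list.
lemma pv_counts_eq_counter (tiles : List (Int × Int)) :
    tiles.foldl (fun d x =>
      (get_white_tile_neighbors x tiles).foldl (fun d y =>
        match d.get? y with
        | some c => d.insert y (c + 1)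
        | none   => d.insert y 1) d)
      (PySem.Dict.empty : PySem.Dict (Int × Int) Int) = PySem.Dict.counter (pvFlat tiles) := by
  have hstep : ∀ (d : PySem.Dict (Int × Int) Int) (y : Int × Int),
      (match d.get? y with
       | some c => d.insert y (c + 1)
       | none   => d.insert y 1) = d.insert y (d.getD y 0 + 1) := by
    intro d y
    cases h : d.get? y with
    | none => simp [PySem.Dict.getD, h]
    | some c => simp [PySem.Dict.getD, h]
  have hfold : ∀ (l : List (Int × Int)) (d : PySem.Dict (Int × Int) Int),
      l.foldl (fun d y =>
        match d.get? y with
        | some c => d.insert y (c + 1)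
        | none   => d.insert y 1) d
      = l.foldl (fun d y => d.insert y (d.getD y 0 + 1)) d := by
    intro l d
    exact PySem.List.foldl_congr_mem l _ _ d (fun acc x _ => hstep acc x)
  have hflat : ∀ (ts : List (Int × Int)) (d : PySem.Dict (Int × Int) Int),
      ts.foldl (fun d x =>
        (get_white_tile_neighbors x tiles).foldl (fun d y =>
          match d.get? y with
          | some c => d.insert y (c + 1)
          | none   => d.insert y 1) d) d
      = (ts.flatMap (fun t => get_white_tile_neighbors t tiles)).foldl
          (fun d y => d.insert y (d.getD y 0 + 1)) d := by
    intro ts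
    induction ts with
    | nil => intro d; simp
    | cons t ts ih =>
        intro d
        rw [List.foldl_cons, ih, hfold, List.flatMap_cons, List.foldl_append]
  rw [hflat, PySem.Dict.foldl_insert_getD_add_one_eq_counter, pvFlat]

lemma pv_count_neighbors (t y : Int × Int) :
    List.count y (get_neighbors t) = if t ∈ get_neighbors y then 1 else 0 := by
  obtain ⟨t1, t2⟩ := t; obtain ⟨y1, y2⟩ := y
  simp [get_neighbors, List.count_cons, Prod.ext_iff, beq_iff_eq]
  split_ifs <;> omega

-- For a white tile y, A's tally of y equals the number of tiles adjacent to y.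
lemma pv_count_flat (tiles : List (Int × Int)) (y : Int × Int)
    (hy : y ∉ tiles) :
    List.count y (pvFlat tiles) = tiles.countP (fun t => decide (t ∈ get_neighbors y)) := by
  rw [pvFlat, List.count_flatMap]
  have h1 : ∀ t : Int × Int, (List.count y ∘ fun t => get_white_tile_neighbors t tiles) t
      = if t ∈ get_neighbors y then 1 else 0 := by
    intro t
    simp only [Function.comp_apply, get_white_tile_neighbors]
    rw [List.count_filter (by simpa using hy), pv_count_neighbors]
  rw [List.map_congr_left (fun t _ => h1 t),
    PySem.List.sum_map_ite_one_zero_nat' (fun t => t ∈ get_neighbors y) tiles]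

-- The white-neighbor generator lists of the two ports coincide.
lemma pv_flat_eq (tiles : List (Int × Int)) :
    pvFlat tiles = tiles.flatMap (fun t =>
      (([(-1, 0), (1, 0), (-1, -1), (0, -1), (0, 1), (1, 1)] : List (Int × Int)).map
          (fun o => (t.1 + o.1, t.2 + o.2))).filter
        (fun c => !(PySem.Set.contains (PySem.Set.ofList tiles) c))) := by
  simp only [pvFlat, get_white_tile_neighbors, get_neighbors, pv_contains_ofList]

lemma pv_main (tiles : List (Int × Int)) :
    determine_white_to_black_tile_flip tiles = determine_white_to_black_tile_flip_alt tiles := by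
  rw [determine_white_to_black_tile_flip, determine_white_to_black_tile_flip_alt]
  simp only [pv_counts_eq_counter, ← pv_flat_eq, PySem.List.dedup_eq_ofList,
    PySem.Dict.keys_counter]
  rw [PySem.List.foldl_append_if _ (fun y : Int × Int => y),
      PySem.List.foldl_append_if _ (fun c : Int × Int => c)]
  simp only [List.nil_append, List.map_id_fun', id]
  apply List.filter_congr
  intro y hy
  have hyw : y ∉ tiles := by
    rcases List.mem_flatMap.1 ((PySem.Set.mem_ofList _ _).1 hy) with ⟨t, -, hmem⟩
    simpa using List.of_mem_filter hmem
  have hnbrs : ∀ t : Int × Int, PySem.Set.contains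
      (PySem.Set.ofList (([(-1, 0), (1, 0), (-1, -1), (0, -1), (0, 1), (1, 1)] :
        List (Int × Int)).map (fun o => (y.1 + o.1, y.2 + o.2)))) t
      = decide (t ∈ get_neighbors y) := by
    intro t
    rw [pv_contains_ofList]
    simp [get_neighbors]
  rw [PySem.Dict.getD_counter, pv_count_flat tiles y hyw]
  simp only [hnbrs, PySem.List.sum_map_ite_one_zero]

-- ===== VERDICT (by name: the statement is the Claim_ definition above) =====
theorem determine_white_to_black_tile_flip_spec : Claim_equal_determine_white_to_black_tile_flip := by
  intro tiles _
  unfold Spec_determine_white_to_black_tile_flip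
  exact pv_main tiles
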